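-- pv_equiv track=rewrite | github.com/ytdl-org/youtube-dl | youtube_dl/extractor/common.py | _xpath_ns
-- ===== SOURCE A (Python) =====
-- def _xpath_ns(path, namespace=None):
--     if not namespace:
--         return path
--     out = []
--     for c in path.split('/'):
--         if not c or c == '.':
--             out.append(c)
--         else:
--             out.append('{%s}%s' % (namespace, c))
--     return '/'.join(out)
-- ===== SOURCE B (Python) =====
-- import re
--
--
-- def _xpath_ns(path, namespace=None):
--     if not namespace:
--         return path
--     return re.sub(
--         r'[^/]+',
--         lambda m: m.group(0) if m.group(0) == '.' else '{%s}%s' % (namespace, m.group(0)),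
--         path)
-- ===== Notes on version B (the rewrite author's own statement) =====
-- stated objective: idiomatic
-- what changed: Replaces the split('/')/loop/append/join pipeline with a single re.sub over maximal non-slash runs, prefixing each run that is not '.' with the namespace; slashes and empty segments are untouched by construction.
import Mathlib
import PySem

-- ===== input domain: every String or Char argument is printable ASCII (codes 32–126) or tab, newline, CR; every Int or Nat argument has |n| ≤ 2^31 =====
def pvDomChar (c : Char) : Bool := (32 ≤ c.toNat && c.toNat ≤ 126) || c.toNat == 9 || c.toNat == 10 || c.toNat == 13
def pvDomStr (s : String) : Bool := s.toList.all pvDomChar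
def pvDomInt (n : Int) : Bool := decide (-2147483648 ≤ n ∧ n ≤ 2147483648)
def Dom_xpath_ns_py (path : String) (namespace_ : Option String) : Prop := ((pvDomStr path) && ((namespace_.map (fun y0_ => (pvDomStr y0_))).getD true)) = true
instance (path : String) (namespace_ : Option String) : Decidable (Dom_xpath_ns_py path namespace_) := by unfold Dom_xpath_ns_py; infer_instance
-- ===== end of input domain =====

-- B replaces A's split('/')/loop/join pipeline with one regex substitution over maximal
-- non-slash runs (same result, more idiomatic); equivalence proved for all inputs.


-- ===== PORT A =====
-- A on char lists: split on '/', append each transformed component to `out`, join with '/'.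
def xpathAChars (ns : List Char) (l : List Char) : List Char :=
  PySem.Chars.join ['/']
    ((PySem.Chars.splitOn l ['/']).foldl
      (fun out c => out ++ [if c = [] ∨ c = ['.'] then c else '{' :: (ns ++ '}' :: c)]) [])

def xpath_ns_py (path : String) (namespace_ : Option String) : String :=
  match namespace_ with
  | none => path                      -- `if not namespace` (None)
  | some ns =>
    if ns = "" then path              -- `if not namespace` (empty string)
    else String.ofList (xpathAChars ns.toList path.toList)

-- ===== PORT B =====
-- B's re.sub(r'[^/]+', repl, path) ported by hand (PySem has no regex): one left-to-right
-- scan; each maximal run of non-'/' characters is replaced by repl(run), every '/' is copied.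
-- Exact: r'[^/]+' matches exactly the maximal non-empty non-slash runs, left to right.
def xpathBGo (pre : List Char) : List Char → List Char
  | [] => []
  | c :: rest =>
    if c = '/' then '/' :: xpathBGo pre rest
    else
      let run := c :: rest.takeWhile (· ≠ '/')
      let tail := rest.dropWhile (· ≠ '/')
      (if run = ['.'] then run else pre ++ run) ++ xpathBGo pre tail
  termination_by l => l.length
  decreasing_by
    · simp
    · simpa using Nat.lt_succ_of_le (List.length_dropWhile_le _ _)

def xpath_ns_py_alt (path : String) (namespace_ : Option String) : String :=
  match namespace_ with
  | none => path
  | some ns =>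
    if ns = "" then path
    else String.ofList (xpathBGo ('{' :: (ns.toList ++ ['}'])) path.toList)

-- ===== PRECONDITION & SPEC =====
def Spec_xpath_ns_py (path : String) (namespace_ : Option String) (out : String) : Prop := out = xpath_ns_py_alt path namespace_
instance (path : String) (namespace_ : Option String) (out : String) : Decidable (Spec_xpath_ns_py path namespace_ out) := by unfold Spec_xpath_ns_py; infer_instance

-- ===== CLAIM (what is proved, stated in full; the proofs are below) =====
def Claim_equal_xpath_ns_py : Prop := ∀ (path : String) (namespace_ : Option String), Dom_xpath_ns_py path namespace_ → Spec_xpath_ns_py path namespace_ (xpath_ns_py path namespace_)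

-- ===== LEMMAS AND PROOFS =====

-- fuel-free splitting on '/'
def splitSlash : List Char → List (List Char)
  | [] => [[]]
  | c :: rest =>
    if c = '/' then [] :: splitSlash rest
    else
      match splitSlash rest with
      | g :: gs => (c :: g) :: gs
      | [] => [[c]]

theorem splitSlash_ne_nil (l : List Char) : splitSlash l ≠ [] := by
  cases l with
  | nil => simp [splitSlash]
  | cons c rest =>
    simp only [splitSlash]
    split
    · simp
    · cases splitSlash rest <;> simp

-- splitSlash through takeWhile/dropWhile
theorem splitSlash_eq_take_drop (l : List Char) :
    splitSlash l = (l.takeWhile (· ≠ '/')) ::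
      (match l.dropWhile (· ≠ '/') with
       | [] => []
       | _ :: t => splitSlash t) := by
  induction l with
  | nil => simp [splitSlash]
  | cons c rest ih =>
    by_cases h : c = '/'
    · subst h; simp [splitSlash, List.takeWhile, List.dropWhile]
    · simp only [splitSlash, if_neg h, ih, List.takeWhile_cons, List.dropWhile_cons]
      simp [h]

def consHead (p : List Char) : List (List Char) → List (List Char)
  | [] => []
  | g :: gs => (p ++ g) :: gs

theorem splitOn_go_eq (fuel : Nat) (l cur : List Char) (acc : List (List Char))
    (h : l.length ≤ fuel) :
    PySem.Chars.splitOn.go ['/'] fuel l cur acc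
      = acc.reverse ++ consHead cur.reverse (splitSlash l) := by
  induction fuel generalizing l cur acc with
  | zero =>
    have : l = [] := List.length_eq_zero_iff.mp (Nat.le_zero.mp h)
    subst this
    simp [PySem.Chars.splitOn.go, splitSlash, consHead]
  | succ n ih =>
    cases l with
    | nil => simp [PySem.Chars.splitOn.go, splitSlash, consHead]
    | cons c rest =>
      simp only [PySem.Chars.splitOn.go]
      by_cases hc : c = '/'
      · subst hc
        have hpre : ['/'].isPrefixOf ('/' :: rest) = true := by
          simp [List.isPrefixOf]
        rw [if_pos hpre]
        have : List.drop ['/'].length ('/' :: rest) = rest := by simp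
        rw [this, ih rest [] (cur.reverse :: acc) (by simpa using Nat.le_of_succ_le_succ h)]
        simp only [splitSlash, consHead, List.reverse_cons,
          List.append_assoc, List.singleton_append]
        cases splitSlash rest <;> simp
      · have hpre : ['/'].isPrefixOf (c :: rest) = false := by
          simp [List.isPrefixOf]
          exact fun h => hc h.symm
        rw [if_neg (by simp [hpre])]
        rw [ih rest (c :: cur) acc (by simpa using Nat.le_of_succ_le_succ h)]
        have hne := splitSlash_ne_nil rest
        cases hs : splitSlash rest with
        | nil => exact absurd hs hne
        | cons g gs =>
          simp [splitSlash, if_neg hc, hs, consHead]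

theorem splitOn_eq_splitSlash (l : List Char) :
    PySem.Chars.splitOn l ['/'] = splitSlash l := by
  unfold PySem.Chars.splitOn
  rw [splitOn_go_eq (l.length + 1) l [] [] (Nat.le_succ _)]
  have hne := splitSlash_ne_nil l
  cases hs : splitSlash l with
  | nil => exact absurd hs hne
  | cons g gs => simp [consHead]

theorem foldl_append_singleton {α β : Type} (f : α → β) (l : List α) (acc : List β) :
    l.foldl (fun out c => out ++ [f c]) acc = acc ++ l.map f := by
  induction l generalizing acc with
  | nil => simp
  | cons c rest ih => simp [List.foldl_cons, ih]

theorem dropWhile_head_false {alpha : Type} (p : alpha → Bool) (l : List alpha) (d : alpha)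
    (t : List alpha) (h : l.dropWhile p = d :: t) : p d = false := by
  induction l generalizing d t with
  | nil => simp at h
  | cons a as ih =>
    rw [List.dropWhile_cons] at h
    split at h
    · exact ih d t h
    · rename_i hp
      injection h with h1 h2
      subst h1
      exact Bool.eq_false_iff.mpr hp

-- the component transform A applies
def fComp (ns : List Char) (c : List Char) : List Char :=
  if c = [] ∨ c = ['.'] then c else '{' :: (ns ++ '}' :: c)

theorem join_map_splitSlash_eq_bGo (ns : List Char) (l : List Char) :
    PySem.Chars.join ['/'] ((splitSlash l).map (fComp ns))
      = xpathBGo ('{' :: (ns ++ ['}'])) l := by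
  induction hn : l.length using Nat.strong_induction_on generalizing l with
  | _ n ih =>
  subst hn
  cases l with
  | nil => simp [splitSlash, fComp, PySem.Chars.join, xpathBGo, List.intercalate]
  | cons c rest =>
    by_cases hc : c = '/'
    · subst hc
      have hrest := ih rest.length (by simp) rest rfl
      rw [show splitSlash ('/' :: rest) = [] :: splitSlash rest by simp [splitSlash]]
      have hne := splitSlash_ne_nil rest
      cases hs : splitSlash rest with
      | nil => exact absurd hs hne
      | cons g gs =>
        rw [List.map_cons, show fComp ns [] = [] by simp [fComp],
            List.map_cons, PySem.Chars.join_cons_cons]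
        rw [hs, List.map_cons] at hrest
        rw [hrest]
        simp [xpathBGo]
    · rw [show xpathBGo ('{' :: (ns ++ ['}'])) (c :: rest)
          = (if (c :: rest.takeWhile (· ≠ '/')) = ['.']
              then (c :: rest.takeWhile (· ≠ '/'))
              else ('{' :: (ns ++ ['}'])) ++ (c :: rest.takeWhile (· ≠ '/')))
            ++ xpathBGo ('{' :: (ns ++ ['}'])) (rest.dropWhile (· ≠ '/'))
          by rw [xpathBGo]; simp [hc]]
      have hsplit := splitSlash_eq_take_drop (c :: rest)
      rw [List.takeWhile_cons, List.dropWhile_cons] at hsplit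
      simp only [show decide (c ≠ '/') = true by simp [hc], if_true] at hsplit
      have hfc : fComp ns (c :: rest.takeWhile (· ≠ '/'))
          = (if (c :: rest.takeWhile (· ≠ '/')) = ['.']
             then (c :: rest.takeWhile (· ≠ '/'))
             else ('{' :: (ns ++ ['}'])) ++ (c :: rest.takeWhile (· ≠ '/'))) := by
        unfold fComp
        by_cases hdot : (c :: rest.takeWhile (· ≠ '/')) = ['.']
        · simp
        · simp
      cases hd : rest.dropWhile (· ≠ '/') with
      | nil =>
        rw [hd] at hsplit
        rw [hsplit, List.map_cons, List.map_nil, PySem.Chars.join_singleton, hfc]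
        simp [xpathBGo]
      | cons d t =>
        have hdlen : t.length < (c :: rest).length := by
          have := List.length_dropWhile_le (p := (· ≠ '/')) (l := rest)
          rw [hd] at this
          simp at this ⊢
          omega
        have ht := ih t.length (by simpa using hdlen) t rfl
        have hdc : d = '/' := by
          have := dropWhile_head_false (fun x => decide (x ≠ '/')) rest d t hd
          simpa using this
        rw [hd] at hsplit
        have hsplit2 : splitSlash (c :: rest)
            = (c :: rest.takeWhile (· ≠ '/')) :: splitSlash t := by rw [hsplit]
        rw [hsplit2]
        have hne := splitSlash_ne_nil t
        cases hs : splitSlash t with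
        | nil => exact absurd hs hne
        | cons g gs =>
          rw [List.map_cons, hfc, List.map_cons, PySem.Chars.join_cons_cons]
          rw [hs, List.map_cons] at ht
          rw [ht, hdc]
          simp [xpathBGo]

theorem xpathA_eq_B (ns l : List Char) :
    xpathAChars ns l = xpathBGo ('{' :: (ns ++ ['}'])) l := by
  unfold xpathAChars
  rw [splitOn_eq_splitSlash,
      show (fun (out : List (List Char)) (c : List Char) =>
          out ++ [if c = [] ∨ c = ['.'] then c else '{' :: (ns ++ '}' :: c)])
        = (fun out c => out ++ [fComp ns c]) from rfl,
      foldl_append_singleton (fComp ns), List.nil_append]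
  exact join_map_splitSlash_eq_bGo ns l

-- ===== VERDICT (by name: the statement is the Claim_ definition above) =====
theorem xpath_ns_py_spec : Claim_equal_xpath_ns_py := by
  intro path namespace_ _
  unfold Spec_xpath_ns_py xpath_ns_py xpath_ns_py_alt
  cases namespace_ with
  | none => rfl
  | some ns =>
    by_cases h : ns = ""
    · simp [h]
    · simp only [if_neg h]
      rw [xpathA_eq_B]
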